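-- pv_equiv track=rewrite | github.com/omiq/retrodocs | scripts/tru_extract.py | _strip_strings
-- ===== SOURCE A (Python) =====
-- def _strip_strings(s: str) -> str:
--     out: list[str] = []
--     i = 0
--     n = len(s)
--     while i < n:
--         ch = s[i]
--         if ch == '"':
--             start = i
--             i += 1
--             while i < n:
--                 if s[i] == "\\" and i + 1 < n:
--                     i += 2
--                     continue
--                 if s[i] == '"':
--                     i += 1
--                     break
--                 i += 1
--             out.append(" " * (i - start))
--             continue
--         if ch == "'":
--             start = i
--             i += 1
--             while i < n:
--                 if s[i] == "\\" and i + 1 < n: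
--                     i += 2
--                     continue
--                 if s[i] == "'":
--                     i += 1
--                     break
--                 i += 1
--             out.append(" " * (i - start))
--             continue
--         out.append(ch)
--         i += 1
--     return "".join(out)
-- ===== SOURCE B (Python) =====
-- def _strip_strings(s: str) -> str:
--     out: list[str] = []
--     state = None  # None outside a literal, else the active quote char
--     i = 0
--     n = len(s)
--     while i < n:
--         ch = s[i]
--         if state is None:
--             if ch in ('"', "'"):
--                 state = ch
--                 out.append(" ")
--             else:
--                 out.append(ch)
--             i += 1
--         else:
--             if ch == "\\" and i + 1 < n:
--                 out.append("  ")
--                 i += 2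
--             else:
--                 out.append(" ")
--                 if ch == state:
--                     state = None
--                 i += 1
--     return "".join(out)
-- ===== Notes on version B (the rewrite author's own statement) =====
-- stated objective: alternative
-- what changed: Replaced A's outer scan with nested per-quote inner consuming loops by a single flat index loop driven by a state variable holding the active quote character (or None), emitting one space per consumed character.
import Mathlib
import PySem

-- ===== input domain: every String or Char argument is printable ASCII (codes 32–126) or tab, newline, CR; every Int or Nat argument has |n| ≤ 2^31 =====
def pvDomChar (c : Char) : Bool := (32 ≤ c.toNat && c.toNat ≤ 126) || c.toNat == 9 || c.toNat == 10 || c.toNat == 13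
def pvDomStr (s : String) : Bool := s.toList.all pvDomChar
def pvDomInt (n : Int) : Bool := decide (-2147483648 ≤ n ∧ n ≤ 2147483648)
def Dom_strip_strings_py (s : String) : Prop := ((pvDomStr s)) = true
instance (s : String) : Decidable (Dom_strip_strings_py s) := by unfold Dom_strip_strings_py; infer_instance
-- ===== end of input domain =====

-- B replaces A's outer scan with a nested inner quote-consuming loop by a single flat
-- state-machine pass (state = active quote or none); same cost, different decomposition.

-- ===== PORT A =====
-- inner while-loop of A: given the quote char q and the chars after the opening quote,
-- returns (number of chars consumed, remaining chars)
def stripInnerA (q : Char) : List Char → Nat × List Char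
  | [] => (0, [])
  | [c] =>
    -- i + 1 < n is false here, so the backslash branch cannot fire
    if c == q then (1, ([] : List Char)) else (1, [])
  | c :: d :: rest =>
    if c == '\\' then ((stripInnerA q rest).1 + 2, (stripInnerA q rest).2)
    else if c == q then (1, d :: rest)
    else ((stripInnerA q (d :: rest)).1 + 1, (stripInnerA q (d :: rest)).2)

theorem stripInnerA_len (q : Char) (l : List Char) : (stripInnerA q l).2.length ≤ l.length := by
  induction l using stripInnerA.induct q with
  | case1 => simp [stripInnerA]
  | case2 c h => simp [stripInnerA, h]
  | case3 c h => simp [stripInnerA, h]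
  | case4 c d rest h ih =>
    simp only [stripInnerA, if_pos h]
    exact le_trans ih (by simp; omega)
  | case5 c d rest h1 h2 => simp [stripInnerA, h1, h2]
  | case6 c d rest h1 h2 ih =>
    simp only [stripInnerA, if_neg h1, if_neg h2]
    exact le_trans ih (by simp)

-- outer while-loop of A
def stripOuterA : List Char → List Char
  | [] => []
  | c :: rest =>
    if c == '"' then
      List.replicate ((stripInnerA '"' rest).1 + 1) ' ' ++ stripOuterA (stripInnerA '"' rest).2
    else if c == '\'' then
      List.replicate ((stripInnerA '\'' rest).1 + 1) ' ' ++ stripOuterA (stripInnerA '\'' rest).2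
    else c :: stripOuterA rest
termination_by l => l.length
decreasing_by
  · exact Nat.lt_succ_of_le (stripInnerA_len _ _)
  · exact Nat.lt_succ_of_le (stripInnerA_len _ _)
  · simp

def strip_strings_py (s : String) : String := String.mk (stripOuterA s.toList)

-- ===== PORT B =====
-- flat single pass; state is none outside a literal, some q inside a q-quoted literal
def stripFsmB (state : Option Char) : List Char → List Char
  | [] => []
  | c :: rest =>
    match state with
    | none =>
      if c == '"' || c == '\'' then ' ' :: stripFsmB (some c) rest
      else c :: stripFsmB none rest
    | some q =>
      match rest with
      | [] => ' ' :: stripFsmB (if c == q then none else some q) []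
      | d :: rest' =>
        if c == '\\' then ' ' :: ' ' :: stripFsmB (some q) rest'
        else if c == q then ' ' :: stripFsmB none (d :: rest')
        else ' ' :: stripFsmB (some q) (d :: rest')

def strip_strings_py_alt (s : String) : String := String.mk (stripFsmB none s.toList)

-- ===== PRECONDITION & SPEC =====
def Spec_strip_strings_py (s : String) (out : String) : Prop := out = strip_strings_py_alt s
instance (s : String) (out : String) : Decidable (Spec_strip_strings_py s out) := by unfold Spec_strip_strings_py; infer_instance

-- ===== CLAIM (what is proved, stated in full; the proofs are below) =====
def Claim_equal_strip_strings_py : Prop := ∀ (s : String), Dom_strip_strings_py s → Spec_strip_strings_py s (strip_strings_py s)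

-- ===== LEMMAS AND PROOFS =====
theorem fsm_inner (q : Char) (l : List Char) :
    stripFsmB (some q) l = List.replicate (stripInnerA q l).1 ' ' ++ stripFsmB none (stripInnerA q l).2 := by
  induction l using stripInnerA.induct q with
  | case1 => simp [stripFsmB, stripInnerA]
  | case2 c h => simp [stripFsmB, stripInnerA, h]
  | case3 c h => simp [stripFsmB, stripInnerA, h]
  | case4 c d rest h ih =>
    simp only [stripInnerA, stripFsmB, if_pos h]
    rw [ih]
    simp [List.replicate_succ]
  | case5 c d rest h1 h2 =>
    simp [stripInnerA, stripFsmB, h1, h2]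
  | case6 c d rest h1 h2 ih =>
    simp only [stripInnerA, stripFsmB, if_neg h1, if_neg h2]
    rw [ih]
    simp [List.replicate_succ]

theorem outerA_eq_fsm (l : List Char) : stripOuterA l = stripFsmB none l := by
  induction l using stripOuterA.induct with
  | case1 => simp [stripOuterA, stripFsmB]
  | case2 c rest h ih =>
    have hc : c = '"' := by simpa using h
    subst hc
    simp only [stripOuterA, stripFsmB, if_pos h]
    rw [fsm_inner, ih]
    simp [List.replicate_succ]
  | case3 c rest h1 h2 ih =>
    have hc : c = '\'' := by simpa using h2
    subst hc
    simp only [stripOuterA, stripFsmB]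
    rw [if_neg h1, if_pos h2, fsm_inner, ih]
    simp [h1, List.replicate_succ]
  | case4 c rest h1 h2 ih =>
    simp [stripOuterA, stripFsmB, h1, h2, ih]

-- ===== VERDICT (by name: the statement is the Claim_ definition above) =====
theorem strip_strings_py_spec : Claim_equal_strip_strings_py := by
  intro s _
  unfold Spec_strip_strings_py strip_strings_py strip_strings_py_alt
  rw [outerA_eq_fsm]
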